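-- pv_equiv track=rewrite | github.com/sadie100/Practice_algorithm | 프로그래머스/답봄/lv2/주식가격.py | solution
-- ===== SOURCE A (Python) =====
-- def solution(prices):
--     answer = [len(prices)-(i+1) for i in range(len(prices))]
--     stack = []
--
--     for i in range(len(prices)):
--         price = prices[i]
--         while(stack):
--             time, val = stack[-1]
--             if val>price:
--                 # 가격 떨어짐
--                 stack.pop()
--                 answer[time] = i-time
--             else:
--                 break
--         stack.append((i, price))
--
--
--     return answer
-- ===== SOURCE B (Python) =====
-- def solution(prices):
--     n = len(prices)
--     answer = []
--     for i in range(n):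
--         count = 0
--         for j in range(i + 1, n):
--             count += 1
--             if prices[j] < prices[i]:
--                 break
--         answer.append(count)
--     return answer
-- ===== Notes on version B (the rewrite author's own statement) =====
-- stated objective: simpler
-- what changed: Replaced the monotonic stack with in-place answer patching by a direct nested forward scan: for each index, count forward until the first strictly smaller price (inclusive).
import Mathlib
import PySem

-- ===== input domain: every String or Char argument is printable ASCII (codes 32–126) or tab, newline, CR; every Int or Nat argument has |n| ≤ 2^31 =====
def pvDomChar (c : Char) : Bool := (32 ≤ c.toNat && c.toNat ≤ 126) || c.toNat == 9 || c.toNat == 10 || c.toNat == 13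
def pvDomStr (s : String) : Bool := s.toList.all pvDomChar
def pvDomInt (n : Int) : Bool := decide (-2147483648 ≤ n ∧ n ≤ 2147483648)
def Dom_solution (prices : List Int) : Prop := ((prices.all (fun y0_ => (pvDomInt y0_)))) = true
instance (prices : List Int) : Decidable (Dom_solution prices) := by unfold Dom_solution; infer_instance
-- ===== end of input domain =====

-- B replaces A's monotonic stack (which patches answers in place) by a plain nested
-- forward scan per index; simpler, not faster.

-- ===== PORT A =====
-- A's inner `while stack:` loop: pop while top value > price, writing answer[time] = i - time
def solutionPop (i : Nat) (price : Int) : List (Nat × Int) → List Int → List (Nat × Int) × List Int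
  | [], ans => ([], ans)
  | (time, val) :: rest, ans =>
    if val > price then solutionPop i price rest (ans.set time ((i : Int) - (time : Int)))
    else ((time, val) :: rest, ans)

def solution (prices : List Int) : List Int :=
  let n := prices.length
  let answer : List Int := (List.range n).map (fun i : Nat => (n : Int) - ((i : Int) + 1))
  let final := (List.range n).foldl
    (fun (st : List (Nat × Int) × List Int) i =>
      let price := prices.getD i 0
      let r := solutionPop i price st.1 st.2
      ((i, price) :: r.1, r.2))
    ([], answer)
  final.2

-- ===== PORT B =====
-- B's inner `for j in range(i+1, n):` loop with its break
def solutionCount (prices : List Int) (p : Int) (j : Nat) (count : Int) : Int :=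
  if h : j < prices.length then
    let c := count + 1
    if prices.getD j 0 < p then c else solutionCount prices p (j + 1) c
  else count
termination_by prices.length - j

def solution_alt (prices : List Int) : List Int :=
  (List.range prices.length).map (fun i => solutionCount prices (prices.getD i 0) (i + 1) 0)

-- ===== PRECONDITION & SPEC =====
def Spec_solution (prices : List Int) (out : List Int) : Prop := out = solution_alt prices
instance (prices : List Int) (out : List Int) : Decidable (Spec_solution prices out) := by unfold Spec_solution; infer_instance

-- ===== CLAIM (what is proved, stated in full; the proofs are below) =====
def Claim_equal_solution : Prop := ∀ (prices : List Int), Dom_solution prices → Spec_solution prices (solution prices)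

-- ===== LEMMAS AND PROOFS =====

-- B characterization: no strictly smaller price from index a on → the scan runs to the end
theorem count_no_drop (prices : List Int) (p : Int) (a : Nat) (c : Int)
    (ha : a ≤ prices.length)
    (h : ∀ j, a ≤ j → j < prices.length → ¬ prices.getD j 0 < p) :
    solutionCount prices p a c = c + ((prices.length - a : Nat) : Int) := by
  by_cases hlt : a < prices.length
  · rw [solutionCount]
    simp only [hlt, dif_pos, if_neg (h a le_rfl hlt)]
    rw [count_no_drop prices p (a+1) (c+1) hlt (fun j hj => h j (by omega))]
    push_cast [Nat.sub_add_eq]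
    omega
  · rw [solutionCount]
    have : a = prices.length := by omega
    simp [this]
termination_by prices.length - a

-- B characterization: first strictly smaller price at j0 → the scan stops there, inclusive
theorem count_drop (prices : List Int) (p : Int) (a : Nat) (c : Int) (j0 : Nat)
    (hj0 : j0 < prices.length) (haj : a ≤ j0)
    (hdrop : prices.getD j0 0 < p)
    (h : ∀ j, a ≤ j → j < j0 → ¬ prices.getD j 0 < p) :
    solutionCount prices p a c = c + ((j0 - a : Nat) : Int) + 1 := by
  rw [solutionCount]
  have hlt : a < prices.length := by omega
  simp only [hlt, dif_pos]
  by_cases he : a = j0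
  · subst he; rw [if_pos hdrop]; simp
  · rw [if_neg (h a le_rfl (by omega))]
    rw [count_drop prices p (a+1) (c+1) j0 hj0 (by omega) hdrop (fun j hj => h j (by omega))]
    push_cast [Nat.sub_add_eq]
    omega
termination_by j0 - a

-- the answer updates A's pop loop performs, as a fold over the popped pairs
def popFold (k : Nat) (popped : List (Nat × Int)) (ans : List Int) : List Int :=
  popped.foldl (fun a p => a.set p.1 ((k : Int) - (p.1 : Int))) ans

theorem popFold_length (k : Nat) (popped : List (Nat × Int)) (ans : List Int) :
    (popFold k popped ans).length = ans.length := by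
  induction popped generalizing ans with
  | nil => rfl
  | cons p rest ih => simp [popFold] at ih ⊢; rw [ih]; simp

theorem popFold_not_mem (k : Nat) (popped : List (Nat × Int)) (ans : List Int) (t : Nat)
    (h : t ∉ popped.map Prod.fst) :
    (popFold k popped ans).getD t 0 = ans.getD t 0 := by
  induction popped generalizing ans with
  | nil => rfl
  | cons p rest ih =>
    simp only [List.map_cons, List.mem_cons, not_or] at h
    show (popFold k rest (ans.set p.1 ((k:Int) - (p.1:Int)))).getD t 0 = ans.getD t 0
    rw [ih _ (by simpa using h.2)]
    simp only [List.getD_eq_getElem?_getD]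
    rw [List.getElem?_set_ne (fun hh => h.1 hh.symm)]

theorem popFold_mem (k : Nat) (popped : List (Nat × Int)) (ans : List Int) (t : Nat)
    (hnd : (popped.map Prod.fst).Nodup) (hmem : t ∈ popped.map Prod.fst)
    (hlt : t < ans.length) :
    (popFold k popped ans).getD t 0 = (k : Int) - (t : Int) := by
  induction popped generalizing ans with
  | nil => simp at hmem
  | cons p rest ih =>
    simp only [List.map_cons, List.nodup_cons] at hnd
    simp only [List.map_cons, List.mem_cons] at hmem
    show (popFold k rest (ans.set p.1 ((k:Int) - (p.1:Int)))).getD t 0 = _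
    rcases hmem with h | h
    · subst h
      rw [popFold_not_mem _ _ _ _ hnd.1]
      simp only [List.getD_eq_getElem?_getD]
      rw [List.getElem?_set_self (by simpa using hlt)]
      simp
    · exact ih _ hnd.2 h (by simpa using hlt)

-- A's pop loop = two filters, given values non-increasing along the stack
theorem pop_eq (k : Nat) (price : Int) (st : List (Nat × Int)) (ans : List Int)
    (hmono : st.Pairwise (fun a b => b.2 ≤ a.2)) :
    solutionPop k price st ans =
      (st.filter (fun p => decide (p.2 ≤ price)),
       popFold k (st.filter (fun p => decide (price < p.2))) ans) := by
  induction st generalizing ans with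
  | nil => rfl
  | cons p rest ih =>
    obtain ⟨t, v⟩ := p
    rw [List.pairwise_cons] at hmono
    simp only [solutionPop]
    by_cases hv : price < v
    · rw [if_pos (by omega : v > price)]
      rw [ih _ hmono.2]
      have h1 : ¬ (v ≤ price) := by omega
      simp only [List.filter_cons, decide_eq_true_eq, if_neg h1, hv, decide_true]
      rfl
    · rw [if_neg (by omega : ¬ v > price)]
      have hall : ∀ q ∈ rest, q.2 ≤ price := fun q hq => le_trans (hmono.1 q hq) (by omega)
      have h2 : rest.filter (fun p => decide (p.2 ≤ price)) = rest :=
        List.filter_eq_self.mpr (fun q hq => by simpa using hall q hq)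
      have h3 : rest.filter (fun p => decide (price < p.2)) = [] :=
        List.filter_eq_nil_iff.mpr (fun q hq => by simpa using not_lt.mpr (hall q hq))
      simp only [List.filter_cons, decide_eq_true_eq, if_pos (by omega : v ≤ price),
        if_neg hv, h2, h3]
      rfl

-- loop invariant of A's outer loop after k steps: the stack holds exactly the indices
-- with no strict drop since them, answers of popped indices are already B's values
def StackInv (prices : List Int) (k : Nat) (st : List (Nat × Int)) (ans : List Int) : Prop :=
  ans.length = prices.length ∧
  (∀ p ∈ st, p.1 < k ∧ p.2 = prices.getD p.1 0) ∧
  (∀ t, t < k → (t ∈ st.map Prod.fst ↔ ∀ j, t < j → j < k → ¬ prices.getD j 0 < prices.getD t 0)) ∧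
  st.Pairwise (fun a b => b.1 < a.1) ∧
  (∀ t, (t ∈ st.map Prod.fst ∨ (k ≤ t ∧ t < prices.length)) →
      ans.getD t 0 = (prices.length : Int) - (t : Int) - 1) ∧
  (∀ t, t < k → t ∉ st.map Prod.fst →
      ans.getD t 0 = solutionCount prices (prices.getD t 0) (t + 1) 0)

theorem inv_mono (prices : List Int) (k : Nat) (st : List (Nat × Int)) (ans : List Int)
    (h : StackInv prices k st ans) : st.Pairwise (fun a b => b.2 ≤ a.2) := by
  obtain ⟨-, h2, h3, h4, -, -⟩ := h
  refine List.Pairwise.imp_of_mem (fun {a b} ha hb hr => ?_) h4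
  obtain ⟨hak, hav⟩ := h2 a ha
  obtain ⟨hbk, hbv⟩ := h2 b hb
  have hmem : b.1 ∈ st.map Prod.fst := List.mem_map_of_mem hb
  have := (h3 b.1 hbk).mp hmem a.1 hr hak
  rw [hav, hbv]; omega

theorem inv_step (prices : List Int) (k : Nat) (st : List (Nat × Int)) (ans : List Int)
    (hk : k < prices.length) (h : StackInv prices k st ans) :
    StackInv prices (k + 1)
      ((k, prices.getD k 0) :: (solutionPop k (prices.getD k 0) st ans).1)
      (solutionPop k (prices.getD k 0) st ans).2 := by
  have hmono := inv_mono prices k st ans h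
  obtain ⟨h1, h2, h3, h4, h5, h6⟩ := h
  set price := prices.getD k 0 with hprice
  rw [pop_eq k price st ans hmono]
  set P := st.filter (fun p => decide (price < p.2)) with hP
  set R := st.filter (fun p => decide (p.2 ≤ price)) with hR
  have hPsub : ∀ p, p ∈ P → p ∈ st := fun p hp => (List.mem_filter.mp hp).1
  have hRsub : ∀ p, p ∈ R → p ∈ st := fun p hp => (List.mem_filter.mp hp).1
  have hPR : ∀ p, p ∈ st → p ∈ P ∨ p ∈ R := by
    intro p hp
    by_cases hc : price < p.2
    · exact Or.inl (List.mem_filter.mpr ⟨hp, by simpa using hc⟩)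
    · exact Or.inr (List.mem_filter.mpr ⟨hp, by simpa using not_lt.mp hc⟩)
  have hidx : ∀ t, t ∈ st.map Prod.fst → (t, prices.getD t 0) ∈ st := by
    intro t ht
    obtain ⟨p, hp, hpt⟩ := List.mem_map.mp ht
    have := (h2 p hp).2
    rcases p with ⟨a, b⟩; simp at hpt; subst hpt; rwa [← this]
  have hPmemIdx : ∀ t, t ∈ P.map Prod.fst ↔ t ∈ st.map Prod.fst ∧ price < prices.getD t 0 := by
    intro t
    constructor
    · intro ht
      obtain ⟨p, hp, hpt⟩ := List.mem_map.mp ht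
      have hpst := hPsub p hp
      have hv := (h2 p hpst).2
      have hcond := (List.mem_filter.mp hp).2
      subst hpt
      exact ⟨List.mem_map_of_mem hpst, by rw [← hv]; simpa using hcond⟩
    · intro ⟨ht, hc⟩
      exact List.mem_map_of_mem (List.mem_filter.mpr ⟨hidx t ht, by simpa using hc⟩)
  have hRmemIdx : ∀ t, t ∈ R.map Prod.fst ↔ t ∈ st.map Prod.fst ∧ prices.getD t 0 ≤ price := by
    intro t
    constructor
    · intro ht
      obtain ⟨p, hp, hpt⟩ := List.mem_map.mp ht
      have hpst := hRsub p hp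
      have hv := (h2 p hpst).2
      have hcond := (List.mem_filter.mp hp).2
      subst hpt
      exact ⟨List.mem_map_of_mem hpst, by rw [← hv]; simpa using hcond⟩
    · intro ⟨ht, hc⟩
      exact List.mem_map_of_mem (List.mem_filter.mpr ⟨hidx t ht, by simpa using hc⟩)
  have hPlt : ∀ t, t ∈ P.map Prod.fst → t < k := by
    intro t ht
    obtain ⟨p, hp, hpt⟩ := List.mem_map.mp ht
    exact hpt ▸ (h2 p (hPsub p hp)).1
  have hPnd : (P.map Prod.fst).Nodup := by
    have : P.Pairwise (fun a b => b.1 < a.1) := List.Pairwise.filter _ h4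
    have : (P.map Prod.fst).Pairwise (fun a b => b < a) := List.pairwise_map.mpr this
    exact this.imp (fun hab => Nat.ne_of_gt hab)
  refine ⟨?_, ?_, ?_, ?_, ?_, ?_⟩
  · simp only [popFold_length]; exact h1
  · intro p hp
    rcases List.mem_cons.mp hp with rfl | hp'
    · exact ⟨Nat.lt_succ_self k, rfl⟩
    · have := h2 p (hRsub p hp')
      exact ⟨Nat.lt_succ_of_lt this.1, this.2⟩
  · intro t ht
    simp only [List.map_cons, List.mem_cons]
    by_cases hteq : t = k
    · subst hteq
      constructor
      · intro _ j hj1 hj2; omega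
      · intro _; exact Or.inl rfl
    · have htk : t < k := by omega
      rw [hRmemIdx t]
      constructor
      · intro hcase
        rcases hcase with rfl | ⟨hst, hle⟩
        · omega
        · intro j hj1 hj2
          by_cases hjk : j = k
          · subst hjk; rw [← hprice]; omega
          · exact (h3 t htk).mp hst j hj1 (by omega)
      · intro hall
        refine Or.inr ⟨(h3 t htk).mpr (fun j hj1 hj2 => hall j hj1 (by omega)), ?_⟩
        have := hall k htk (Nat.lt_succ_self k)
        rw [← hprice] at this; omega
  · refine List.pairwise_cons.mpr ⟨?_, List.Pairwise.filter _ h4⟩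
    intro p hp; exact (h2 p (hRsub p hp)).1
  · intro t hcase
    simp only [List.map_cons, List.mem_cons] at hcase
    have hnotP : t ∉ P.map Prod.fst := by
      rcases hcase with (rfl | hR') | ⟨hge, _⟩
      · intro hP'; exact absurd (hPlt t hP') (by omega)
      · intro hP'
        have h₁ := (hPmemIdx t).mp hP'
        have h₂ := (hRmemIdx t).mp hR'
        omega
      · intro hP'; exact absurd (hPlt t hP') (by omega)
    rw [popFold_not_mem _ _ _ _ hnotP]
    apply h5
    rcases hcase with (rfl | hR') | ⟨hge, hlt⟩
    · exact Or.inr ⟨le_rfl, hk⟩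
    · exact Or.inl ((hRmemIdx t).mp hR').1
    · exact Or.inr ⟨by omega, hlt⟩
  · intro t ht hnot
    simp only [List.map_cons, List.mem_cons, not_or] at hnot
    obtain ⟨htk', hnotR⟩ := hnot
    have htk : t < k := by omega
    by_cases hPm : t ∈ P.map Prod.fst
    · have hdropk : price < prices.getD t 0 := ((hPmemIdx t).mp hPm).2
      have hst : t ∈ st.map Prod.fst := ((hPmemIdx t).mp hPm).1
      rw [popFold_mem _ _ _ _ hPnd hPm (by omega)]
      rw [count_drop prices (prices.getD t 0) (t+1) 0 k hk (by omega) (by rw [← hprice]; omega)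
        (fun j hj1 hj2 => (h3 t htk).mp hst j (by omega) (by omega))]
      have : ((k - (t+1) : Nat) : Int) = (k : Int) - (t : Int) - 1 := by omega
      rw [this]; ring
    · have hnst : t ∉ st.map Prod.fst := by
        intro hst
        rcases hPR _ (hidx t hst) with hp | hr
        · exact hPm (List.mem_map_of_mem hp)
        · exact hnotR (List.mem_map_of_mem hr)
      rw [popFold_not_mem _ _ _ _ hPm]
      exact h6 t htk hnst

theorem inv_main (prices : List Int) (k : Nat) (hk : k ≤ prices.length) :
    StackInv prices k
      (((List.range k).foldl
        (fun (st : List (Nat × Int) × List Int) i =>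
          let price := prices.getD i 0
          let r := solutionPop i price st.1 st.2
          ((i, price) :: r.1, r.2))
        ([], (List.range prices.length).map
          (fun i : Nat => ((prices.length : Int)) - ((i : Int) + 1)))).1)
      (((List.range k).foldl
        (fun (st : List (Nat × Int) × List Int) i =>
          let price := prices.getD i 0
          let r := solutionPop i price st.1 st.2
          ((i, price) :: r.1, r.2))
        ([], (List.range prices.length).map
          (fun i : Nat => ((prices.length : Int)) - ((i : Int) + 1)))).2) := by
  induction k with
  | zero =>
    simp only [List.range_zero, List.foldl_nil]
    refine ⟨by simp, by simp, fun t ht => absurd ht (Nat.not_lt_zero t), by simp, ?_,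
      fun t ht => absurd ht (Nat.not_lt_zero t)⟩
    intro t ht
    rcases ht with ht | ⟨-, ht⟩
    · simp at ht
    · rw [List.getD_eq_getElem _ _ (by simpa using ht)]
      rw [List.getElem_map, List.getElem_range]
      ring
  | succ k ih =>
    rw [List.range_succ, List.foldl_append, List.foldl_cons, List.foldl_nil]
    exact inv_step prices k _ _ (by omega) (ih (by omega))

theorem solution_eq_alt (prices : List Int) : solution prices = solution_alt prices := by
  have hinv := inv_main prices prices.length le_rfl
  obtain ⟨h1, h2, h3, h4, h5, h6⟩ := hinv
  have hlen1 : (solution prices).length = prices.length := h1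
  have hlen2 : (solution_alt prices).length = prices.length := by simp [solution_alt]
  apply List.ext_getElem (by rw [hlen1, hlen2])
  intro i hi1 hi2
  have hin : i < prices.length := hlen1 ▸ hi1
  have hval : (solution prices).getD i 0
      = solutionCount prices (prices.getD i 0) (i + 1) 0 := by
    by_cases hmem : i ∈ (((List.range prices.length).foldl
        (fun (st : List (Nat × Int) × List Int) i =>
          let price := prices.getD i 0
          let r := solutionPop i price st.1 st.2
          ((i, price) :: r.1, r.2))
        ([], (List.range prices.length).map
          (fun i : Nat => ((prices.length : Int)) - ((i : Int) + 1)))).1).map Prod.fst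
    · have hv := h5 i (Or.inl hmem)
      have hcount := count_no_drop prices (prices.getD i 0) (i+1) 0 (by omega)
        (fun j hj1 hj2 => (h3 i hin).mp hmem j (by omega) (by omega))
      rw [show solution prices = (((List.range prices.length).foldl
        (fun (st : List (Nat × Int) × List Int) i =>
          let price := prices.getD i 0
          let r := solutionPop i price st.1 st.2
          ((i, price) :: r.1, r.2))
        ([], (List.range prices.length).map
          (fun i : Nat => ((prices.length : Int)) - ((i : Int) + 1)))).2) from rfl]
      rw [hv, hcount]
      omega
    · exact h6 i hin hmem
  have hval2 : (solution_alt prices).getD i 0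
      = solutionCount prices (prices.getD i 0) (i + 1) 0 := by
    rw [List.getD_eq_getElem _ 0 hi2]
    simp [solution_alt]
  rw [← List.getD_eq_getElem (solution prices) 0 hi1,
      ← List.getD_eq_getElem (solution_alt prices) 0 hi2, hval, hval2]

-- ===== VERDICT (by name: the statement is the Claim_ definition above) =====
theorem solution_spec : Claim_equal_solution := by
  intro prices _
  exact solution_eq_alt prices
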